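-- pv_equiv track=rewrite | github.com/JoanWu5/Grokking-the-coding-interview | modified binary search/bitonic array maximum.py | bitonic_array_maximum
-- ===== SOURCE A (Python) =====
-- def bitonic_array_maximum(arr):
--     if len(arr) == 0:
--         return None
--
--     start, end = 0, len(arr) - 1
--     while start < end:
--         mid = start + (end - start) // 2
--         if arr[mid] > arr[mid + 1]:
--             end = mid
--         else:
--             start = mid + 1
--
--     return arr[start]
-- ===== SOURCE B (Python) =====
-- def bitonic_array_maximum(arr):
--     if len(arr) == 0:
--         return None
--
--     def shrink(w):
--         if len(w) == 1:
--             return w[0]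
--         m = (len(w) - 1) // 2
--         if w[m] > w[m + 1]:
--             return shrink(w[:m + 1])
--         return shrink(w[m + 1:])
--
--     return shrink(arr)
-- ===== Notes on version B (the rewrite author's own statement) =====
-- stated objective: alternative
-- what changed: The index-pair while loop is replaced by a recursion on shrinking list windows (slices): no start/end indices are maintained, each step recurses on the half-slice itself.
import Mathlib
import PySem

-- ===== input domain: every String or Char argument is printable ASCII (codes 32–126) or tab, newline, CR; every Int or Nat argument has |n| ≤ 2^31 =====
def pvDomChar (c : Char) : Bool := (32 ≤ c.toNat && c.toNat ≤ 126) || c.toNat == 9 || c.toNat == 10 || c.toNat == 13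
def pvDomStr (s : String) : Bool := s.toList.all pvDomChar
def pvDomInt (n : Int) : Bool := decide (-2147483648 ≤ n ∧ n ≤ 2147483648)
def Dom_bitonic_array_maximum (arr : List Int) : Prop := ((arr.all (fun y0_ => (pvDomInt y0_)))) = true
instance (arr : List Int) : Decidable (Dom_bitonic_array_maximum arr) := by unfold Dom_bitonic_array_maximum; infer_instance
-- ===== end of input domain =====

-- B replaces A's start/end-index while loop by a recursion on shrinking list slices (no indices maintained); same narrowing, similar cost.


-- ===== PORT A =====
-- the while loop of A, state (start, fin); fuel is a totality guard only (fuel = arr.length ≥ iterations).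
-- indices are always in range (0 ≤ mid < mid+1 ≤ fin < arr.length), so getD is exact for Python's arr[i]
def pvLoopA (arr : List Int) : Nat → Nat → Nat → Nat
  | 0, start, _ => start
  | fuel + 1, start, fin =>
    if start < fin then
      let mid := start + (fin - start) / 2
      if arr.getD mid 0 > arr.getD (mid + 1) 0 then
        pvLoopA arr fuel start mid
      else
        pvLoopA arr fuel (mid + 1) fin
    else start

def bitonic_array_maximum (arr : List Int) : Option Int :=
  if arr.length = 0 then none
  else some (arr.getD (pvLoopA arr arr.length 0 (arr.length - 1)) 0)

-- ===== PORT B =====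
-- shrink(w): recursion on the slice itself; w[:m+1] → w.take (m+1), w[m+1:] → w.drop (m+1).
-- shrink is only ever applied to nonempty lists, so the `length ≤ 1` base case is exactly Python's `len(w) == 1`;
-- fuel is a totality guard only (fuel = arr.length ≥ recursion depth, the window strictly shrinks).
def pvShrink : Nat → List Int → Int
  | 0, w => w.getD 0 0
  | fuel + 1, w =>
    if w.length ≤ 1 then w.getD 0 0
    else
      let m := (w.length - 1) / 2
      if w.getD m 0 > w.getD (m + 1) 0 then
        pvShrink fuel (w.take (m + 1))
      else
        pvShrink fuel (w.drop (m + 1))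

def bitonic_array_maximum_alt (arr : List Int) : Option Int :=
  if arr.length = 0 then none
  else some (pvShrink arr.length arr)

-- ===== PRECONDITION & SPEC =====
def Spec_bitonic_array_maximum (arr : List Int) (out : Option Int) : Prop := out = bitonic_array_maximum_alt arr
instance (arr : List Int) (out : Option Int) : Decidable (Spec_bitonic_array_maximum arr out) := by unfold Spec_bitonic_array_maximum; infer_instance

-- ===== CLAIM (what is proved, stated in full; the proofs are below) =====
def Claim_equal_bitonic_array_maximum : Prop := ∀ (arr : List Int), Dom_bitonic_array_maximum arr → Spec_bitonic_array_maximum arr (bitonic_array_maximum arr)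

-- ===== LEMMAS AND PROOFS =====
-- reading an element of the window (arr.drop lo).take k is reading arr at lo + i
theorem pv_window_getD (arr : List Int) (lo k i : Nat) (hik : i < k) :
    ((arr.drop lo).take k).getD i 0 = arr.getD (lo + i) 0 := by
  simp [List.getD, List.getElem?_take, hik, List.getElem?_drop]

theorem pv_window_length (arr : List Int) (lo k : Nat) (h : lo + k ≤ arr.length) :
    ((arr.drop lo).take k).length = k := by
  simp; omega

-- B's slice recursion computes A's loop result: shrink on the window [lo..hi] of arr equals arr[pvLoopA lo hi]
theorem pv_shrink_eq_loop (arr : List Int) : ∀ (fuel lo hi : Nat), lo ≤ hi → hi < arr.length →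
    hi - lo ≤ fuel →
    pvShrink fuel ((arr.drop lo).take (hi - lo + 1)) = arr.getD (pvLoopA arr fuel lo hi) 0 := by
  intro fuel
  induction fuel with
  | zero =>
    intro lo hi hle hlen hfuel
    have : lo = hi := by omega
    subst this
    rw [pvShrink, pvLoopA]
    simpa using pv_window_getD arr lo (lo - lo + 1) 0 (by omega)
  | succ n ih =>
    intro lo hi hle hlen hfuel
    rw [pvShrink, pvLoopA]
    have hwl : ((arr.drop lo).take (hi - lo + 1)).length = hi - lo + 1 :=
      pv_window_length arr lo (hi - lo + 1) (by omega)
    by_cases hlt : lo < hi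
    · rw [if_neg (by omega), if_pos hlt]
      have g1 := pv_window_getD arr lo (hi - lo + 1) ((hi - lo) / 2) (by omega)
      have g2 := pv_window_getD arr lo (hi - lo + 1) ((hi - lo) / 2 + 1) (by omega)
      have hmid' : lo + ((hi - lo) / 2 + 1) = lo + (hi - lo) / 2 + 1 := by omega
      simp only [hwl, Nat.add_sub_cancel, g1, g2, hmid']
      split
      · -- descending: window shrinks to take (m+1) = window [lo .. lo + m]
        have htake : ((arr.drop lo).take (hi - lo + 1)).take ((hi - lo) / 2 + 1)
            = (arr.drop lo).take ((lo + (hi - lo) / 2) - lo + 1) := by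
          rw [List.take_take]
          congr 1
          omega
        rw [htake, ih lo (lo + (hi - lo) / 2) (by omega) (by omega) (by omega)]
      · -- non-descending: window shrinks to drop (m+1) = window [lo + m + 1 .. hi]
        have hdrop : ((arr.drop lo).take (hi - lo + 1)).drop ((hi - lo) / 2 + 1)
            = (arr.drop (lo + (hi - lo) / 2 + 1)).take (hi - (lo + (hi - lo) / 2 + 1) + 1) := by
          rw [List.drop_take, List.drop_drop]
          congr 1 <;> omega
        rw [hdrop, ih (lo + (hi - lo) / 2 + 1) hi (by omega) hlen (by omega)]
    · have : lo = hi := by omega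
      subst this
      rw [if_pos (by omega), if_neg (by omega)]
      simpa using pv_window_getD arr lo (lo - lo + 1) 0 (by omega)

-- ===== VERDICT (by name: the statement is the Claim_ definition above) =====
theorem bitonic_array_maximum_spec : Claim_equal_bitonic_array_maximum := by
  intro arr _
  unfold Spec_bitonic_array_maximum bitonic_array_maximum bitonic_array_maximum_alt
  by_cases h : arr.length = 0
  · simp [h]
  · have hfull : (arr.drop 0).take (arr.length - 1 - 0 + 1) = arr := by
      simp; omega
    rw [if_neg h, if_neg h]
    rw [← pv_shrink_eq_loop arr arr.length 0 (arr.length - 1) (by omega) (by omega) (by omega),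
      hfull]
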